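-- pv_equiv track=rewrite | github.com/digital-map-exp/digital-map-public | util/app_list.py | compare_lists2
-- ===== SOURCE A (Python) =====
-- def compare_lists2(old_list, new_list):
--
--     new_members = []
--     deleted_members = old_list
--     same_members = []
--
--     for new_member in new_list:
--         if new_member in old_list:
--             same_members.append(new_member)
--             deleted_members.remove(new_member)
--         else:
--             new_members.append(new_member)
--
--     return new_members, same_members, deleted_members
-- ===== SOURCE B (Python) =====
-- def compare_lists2(old_list, new_list):
--     # count-based classification pass over new_list, then a separate
--     # credit-consuming filter pass over old_list; old_list is updated
--     # in place (as A does, via aliasing)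
--     remaining = {}
--     for m in old_list:
--         remaining[m] = remaining.get(m, 0) + 1
--
--     new_members = []
--     same_members = []
--     for m in new_list:
--         if remaining.get(m, 0) > 0:
--             remaining[m] = remaining.get(m, 0) - 1
--             same_members.append(m)
--         else:
--             new_members.append(m)
--
--     credit = {}
--     for m in same_members:
--         credit[m] = credit.get(m, 0) + 1
--
--     deleted = []
--     for m in old_list:
--         if credit.get(m, 0) > 0:
--             credit[m] = credit.get(m, 0) - 1
--         else:
--             deleted.append(m)
--
--     old_list[:] = deleted
--     return new_members, same_members, old_list
-- ===== Notes on version B (the rewrite author's own statement) =====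
-- stated objective: faster
-- what changed: Replaces A's single pass with linear 'in' tests and in-place .remove on the shrinking old_list by a count-table classification pass over new_list plus a separate credit-consuming filter pass over old_list (written back with old_list[:] = ... to keep A's in-place mutation).
import Mathlib
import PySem

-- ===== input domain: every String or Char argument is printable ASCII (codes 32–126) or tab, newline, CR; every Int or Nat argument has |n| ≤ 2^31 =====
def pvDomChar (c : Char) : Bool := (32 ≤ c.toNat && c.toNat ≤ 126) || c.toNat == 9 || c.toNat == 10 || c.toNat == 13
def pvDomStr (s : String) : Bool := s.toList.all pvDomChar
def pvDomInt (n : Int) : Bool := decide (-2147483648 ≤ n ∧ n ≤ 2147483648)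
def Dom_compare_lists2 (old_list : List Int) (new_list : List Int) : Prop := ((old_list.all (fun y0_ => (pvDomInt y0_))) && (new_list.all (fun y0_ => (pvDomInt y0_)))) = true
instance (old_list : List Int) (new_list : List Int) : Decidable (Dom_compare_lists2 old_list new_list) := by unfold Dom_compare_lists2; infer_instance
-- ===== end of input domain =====

-- B replaces A's quadratic membership-test-and-remove pass by a linear count-table
-- classification plus a credit-consuming filter pass (A mutates old_list in place;
-- B writes the same survivors back into old_list, so the side effect is preserved).


-- ===== PORT A =====
-- 'new_member in old_list' is a test against the current deleted_members: in the
-- Python, deleted_members aliases old_list and is mutated by .remove.  The .remove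
-- call is only reached when the element is present, so remove? is always some;
-- '.getD deleted_members' only totalises that branch.
def compare_lists2 (old_list : List Int) (new_list : List Int) : List Int × List Int × List Int :=
  new_list.foldl
    (fun (st : List Int × List Int × List Int) new_member =>
      let (new_members, same_members, deleted_members) := st
      if new_member ∈ deleted_members then
        (new_members, same_members ++ [new_member],
          (PySem.List.remove? deleted_members new_member).getD deleted_members)
      else
        (new_members ++ [new_member], same_members, deleted_members))
    ([], [], old_list)

-- ===== PORT B =====
def compare_lists2_alt (old_list : List Int) (new_list : List Int) : List Int × List Int × List Int :=
  let remaining : PySem.Dict Int Int :=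
    old_list.foldl (fun d m => d.insert m (d.getD m 0 + 1)) PySem.Dict.empty
  let cls :=
    new_list.foldl
      (fun (st : PySem.Dict Int Int × List Int × List Int) m =>
        let (rem, new_members, same_members) := st
        if rem.getD m 0 > 0 then
          (rem.insert m (rem.getD m 0 - 1), new_members, same_members ++ [m])
        else
          (rem, new_members ++ [m], same_members))
      (remaining, [], [])
  let credit : PySem.Dict Int Int :=
    cls.2.2.foldl (fun d m => d.insert m (d.getD m 0 + 1)) PySem.Dict.empty
  let del :=
    old_list.foldl
      (fun (st : PySem.Dict Int Int × List Int) m =>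
        let (c, deleted) := st
        if c.getD m 0 > 0 then
          (c.insert m (c.getD m 0 - 1), deleted)
        else
          (c, deleted ++ [m]))
      (credit, [])
  (cls.2.1, cls.2.2, del.2)

-- ===== PRECONDITION & SPEC =====
def Spec_compare_lists2 (old_list : List Int) (new_list : List Int) (out : List Int × List Int × List Int) : Prop := out = compare_lists2_alt old_list new_list
instance (old_list : List Int) (new_list : List Int) (out : List Int × List Int × List Int) : Decidable (Spec_compare_lists2 old_list new_list out) := by unfold Spec_compare_lists2; infer_instance

-- ===== CLAIM (what is proved, stated in full; the proofs are below) =====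
def Claim_equal_compare_lists2 : Prop := ∀ (old_list : List Int) (new_list : List Int), Dom_compare_lists2 old_list new_list → Spec_compare_lists2 old_list new_list (compare_lists2 old_list new_list)

-- ===== LEMMAS AND PROOFS =====

/-- Reference recursion for A's loop: classify `ms` against the shrinking list `del`. -/
def gSpec : List Int → List Int → List Int × List Int × List Int
  | [], del => ([], [], del)
  | m :: ms, del =>
    if m ∈ del then
      let r := gSpec ms (del.erase m)
      (r.1, m :: r.2.1, r.2.2)
    else
      let r := gSpec ms del
      (m :: r.1, r.2.1, r.2.2)

/-- Decrement a count function at `m`. -/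
def decAt (f : Int → Nat) (m : Int) : Int → Nat := fun v => if v = m then f v - 1 else f v

/-- Reference recursion for B's classification pass, over an abstract count function. -/
def hSpec : List Int → (Int → Nat) → List Int × List Int
  | [], _ => ([], [])
  | m :: ms, f =>
    if 0 < f m then
      let r := hSpec ms (decAt f m)
      (r.1, m :: r.2)
    else
      let r := hSpec ms f
      (m :: r.1, r.2)

/-- Reference recursion for B's deletion pass: keep `x` unless a credit is consumed. -/
def fcSpec : List Int → (Int → Nat) → List Int
  | [], _ => []
  | x :: xs, f =>
    if 0 < f x then fcSpec xs (decAt f x)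
    else x :: fcSpec xs f

lemma decAt_comm (f : Int → Nat) (a b : Int) : decAt (decAt f a) b = decAt (decAt f b) a := by
  funext v
  simp only [decAt]
  split_ifs <;> rfl

lemma aFold (ms : List Int) (ns ss del : List Int) :
    ms.foldl
      (fun (st : List Int × List Int × List Int) new_member =>
        let (new_members, same_members, deleted_members) := st
        if new_member ∈ deleted_members then
          (new_members, same_members ++ [new_member],
            (PySem.List.remove? deleted_members new_member).getD deleted_members)
        else
          (new_members ++ [new_member], same_members, deleted_members))
      (ns, ss, del)
    = (ns ++ (gSpec ms del).1, ss ++ (gSpec ms del).2.1, (gSpec ms del).2.2) := by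
  induction ms generalizing ns ss del with
  | nil => simp [gSpec]
  | cons m ms ih =>
    simp only [List.foldl_cons, gSpec]
    by_cases hm : m ∈ del
    · rw [PySem.List.remove?_eq_some_erase del m hm]
      simp only [hm, if_true, Option.getD_some, ih]
      simp
    · simp only [hm, if_false, ih]
      simp

lemma bClassifyFold (ms : List Int) (d : PySem.Dict Int Int) (f : Int → Nat)
    (ns ss : List Int) (hd : ∀ v, d.getD v 0 = (f v : Int)) :
    (ms.foldl
      (fun (st : PySem.Dict Int Int × List Int × List Int) m =>
        let (rem, new_members, same_members) := st
        if rem.getD m 0 > 0 then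
          (rem.insert m (rem.getD m 0 - 1), new_members, same_members ++ [m])
        else
          (rem, new_members ++ [m], same_members))
      (d, ns, ss)).2
    = (ns ++ (hSpec ms f).1, ss ++ (hSpec ms f).2) := by
  induction ms generalizing d f ns ss with
  | nil => simp [hSpec]
  | cons m ms ih =>
    simp only [List.foldl_cons, hSpec]
    by_cases hf : 0 < f m
    · have hpos : d.getD m 0 > 0 := by rw [hd m]; exact_mod_cast hf
      simp only [hpos, if_true, hf]
      rw [ih _ (decAt f m) _ _ ?_]
      · simp
      · intro v
        rw [PySem.Dict.getD_insert]
        simp only [decAt]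
        split_ifs with hv
        · subst hv; rw [hd v]; omega
        · exact hd v
    · have hneg : ¬ d.getD m 0 > 0 := by rw [hd m]; omega
      simp only [hneg, if_false, hf]
      rw [ih d f (ns ++ [m]) ss hd]
      simp

lemma bDeleteFold (l : List Int) (c : PySem.Dict Int Int) (f : Int → Nat)
    (acc : List Int) (hc : ∀ v, c.getD v 0 = (f v : Int)) :
    (l.foldl
      (fun (st : PySem.Dict Int Int × List Int) m =>
        let (c, deleted) := st
        if c.getD m 0 > 0 then
          (c.insert m (c.getD m 0 - 1), deleted)
        else
          (c, deleted ++ [m]))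
      (c, acc)).2
    = acc ++ fcSpec l f := by
  induction l generalizing c f acc with
  | nil => simp [fcSpec]
  | cons m ms ih =>
    simp only [List.foldl_cons, fcSpec]
    by_cases hf : 0 < f m
    · have hpos : c.getD m 0 > 0 := by rw [hc m]; exact_mod_cast hf
      simp only [hpos, if_true, hf]
      apply ih _ (decAt f m)
      intro v
      rw [PySem.Dict.getD_insert]
      simp only [decAt]
      split_ifs with hv
      · subst hv; rw [hc v]; omega
      · exact hc v
    · have hneg : ¬ c.getD m 0 > 0 := by rw [hc m]; omega
      simp only [hneg, if_false, hf, ih _ f _ hc]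
      simp

lemma h_eq_g (ms : List Int) (del : List Int) (f : Int → Nat)
    (hf : ∀ v, f v = del.count v) :
    hSpec ms f = ((gSpec ms del).1, (gSpec ms del).2.1) := by
  induction ms generalizing del f with
  | nil => simp [hSpec, gSpec]
  | cons m ms ih =>
    simp only [hSpec, gSpec]
    by_cases hm : m ∈ del
    · have hfm : 0 < f m := by rw [hf m]; exact List.count_pos_iff.mpr hm
      simp only [hfm, if_true, hm]
      rw [ih (del.erase m) (decAt f m) ?_]
      intro v
      simp only [decAt, List.count_erase]
      by_cases hv : v = m
      · subst hv; simp [hf v]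
      · have h2 : (m == v) = false := by simp [Ne.symm hv]
        simp [hv, h2, hf v]
    · have hfm : ¬ 0 < f m := by rw [hf m]; simp [List.count_eq_zero_of_not_mem hm]
      simp only [hfm, if_false, hm]
      rw [ih del f hf]

lemma fc_zero (l : List Int) (f : Int → Nat) (hf : ∀ v, f v = 0) : fcSpec l f = l := by
  induction l with
  | nil => rfl
  | cons x xs ih =>
    simp only [fcSpec, hf x]
    simp [ih]

lemma fc_erase (del : List Int) (f : Int → Nat) (m : Int)
    (hm : m ∈ del) (hfm : 0 < f m) :
    fcSpec del f = fcSpec (del.erase m) (decAt f m) := by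
  induction del generalizing f with
  | nil => cases hm
  | cons x xs ih =>
    by_cases hx : x = m
    · subst hx
      rw [List.erase_cons_head]
      simp [fcSpec, hfm]
    · rw [List.erase_cons_tail (by simp [hx])]
      have hm' : m ∈ xs := by
        rcases List.mem_cons.mp hm with h | h
        · exact absurd h.symm hx
        · exact h
      have hfx : decAt f m x = f x := by simp [decAt, hx]
      simp only [fcSpec, hfx]
      by_cases hc : 0 < f x
      · simp only [hc, if_true]
        rw [ih (decAt f x) hm' (by simpa [decAt, Ne.symm hx] using hfm)]
        rw [decAt_comm]
      · simp only [hc, if_false]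
        rw [ih f hm' hfm]

lemma fcSpec_congr (l : List Int) (f g : Int → Nat) (h : f = g) : fcSpec l f = fcSpec l g := by
  rw [h]

lemma g_del (ms : List Int) (del : List Int) :
    (gSpec ms del).2.2 = fcSpec del (fun v => (gSpec ms del).2.1.count v) := by
  induction ms generalizing del with
  | nil =>
    simp only [gSpec]
    rw [fc_zero del _ (by intro v; simp)]
  | cons m ms ih =>
    simp only [gSpec]
    by_cases hm : m ∈ del
    · simp only [hm, if_true]
      have hpos : 0 < (m :: (gSpec ms (del.erase m)).2.1).count m := by
        simp [List.count_cons_self]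
      rw [fc_erase del _ m hm hpos]
      rw [fcSpec_congr (del.erase m)
            (decAt (fun v => (m :: (gSpec ms (del.erase m)).2.1).count v) m)
            (fun v => (gSpec ms (del.erase m)).2.1.count v) ?_]
      · exact ih (del.erase m)
      · funext v
        simp only [decAt, List.count_cons]
        by_cases hv : v = m
        · subst hv; simp
        · have h2 : (m == v) = false := by simp [Ne.symm hv]
          simp [hv, h2]
    · simp only [hm, if_false]
      exact ih del

-- ===== VERDICT (by name: the statement is the Claim_ definition above) =====
theorem compare_lists2_spec : Claim_equal_compare_lists2 := by
  intro old_list new_list _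
  unfold Spec_compare_lists2 compare_lists2 compare_lists2_alt
  rw [aFold new_list [] [] old_list]
  simp only [List.nil_append]
  have hrem : ∀ v : Int,
      (old_list.foldl (fun d m => d.insert m (d.getD m 0 + 1)) PySem.Dict.empty).getD v 0
        = ((old_list.count v : Nat) : Int) := by
    intro v
    rw [PySem.Dict.foldl_insert_getD_add_one_eq_counter, PySem.Dict.getD_counter]
  rw [bClassifyFold new_list _ (fun v => old_list.count v) [] [] hrem]
  rw [h_eq_g new_list old_list _ (fun v => rfl)]
  simp only [List.nil_append]
  have hcred : ∀ v : Int,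
      ((gSpec new_list old_list).2.1.foldl (fun d m => d.insert m (d.getD m 0 + 1))
          PySem.Dict.empty).getD v 0
        = (((gSpec new_list old_list).2.1.count v : Nat) : Int) := by
    intro v
    rw [PySem.Dict.foldl_insert_getD_add_one_eq_counter, PySem.Dict.getD_counter]
  rw [bDeleteFold old_list _ (fun v => (gSpec new_list old_list).2.1.count v) [] hcred]
  simp only [List.nil_append]
  rw [← g_del new_list old_list]
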